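-- pv_equiv track=rewrite | github.com/mathigatti/EmotivClassifier | src/Python/brainSectionsConnectivity.py | assignedBrainSection
-- ===== SOURCE A (Python) =====
-- def assignedBrainSection(label):
--   pt_izq = ['P7', 'T7', 'O1']
--   pt_der = ['P8', 'T8', 'O2']
--   frontal_izq = ['F3', 'F7', 'AF3']
--   frontal_der = ['F4', 'F8', 'AF4']
--
--   emotivLabels = [pt_izq, pt_der, frontal_der,frontal_izq]
--   for i in range(len(emotivLabels)):
--     if label in emotivLabels[i]:
--       return i
--   return -1
-- ===== SOURCE B (Python) =====
-- def assignedBrainSection(label):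
--   # Decode the label structurally: split into a region prefix and a digit,
--   # then compute the section from the region and the digit's parity
--   # (odd digit = left hemisphere, even = right).
--   if len(label) == 3 and label[0] == 'A':
--     head, tail = label[:2], label[2]
--   elif len(label) == 2:
--     head, tail = label[:1], label[1]
--   else:
--     return -1
--   n = ord(tail) - ord('0')
--   if not 0 <= n <= 9:
--     return -1
--   if head in ('P', 'T'):
--     valid, frontal = n in (7, 8), False
--   elif head == 'O':
--     valid, frontal = n in (1, 2), False
--   elif head == 'F':
--     valid, frontal = n in (3, 4, 7, 8), True
--   elif head == 'AF':
--     valid, frontal = n in (3, 4), True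
--   else:
--     return -1
--   if not valid:
--     return -1
--   odd = n % 2 == 1
--   if frontal:
--     return 3 if odd else 2
--   return 0 if odd else 1
-- ===== Notes on version B (the rewrite author's own statement) =====
-- stated objective: alternative
-- what changed: Instead of scanning four hard-coded group lists, B decodes the label structurally: it splits it into a region prefix ('P'/'T'/'O'/'F'/'AF') and a digit, validates the digit for the region, and computes the section index arithmetically from the region and the digit's parity (odd = left hemisphere).
import Mathlib
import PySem

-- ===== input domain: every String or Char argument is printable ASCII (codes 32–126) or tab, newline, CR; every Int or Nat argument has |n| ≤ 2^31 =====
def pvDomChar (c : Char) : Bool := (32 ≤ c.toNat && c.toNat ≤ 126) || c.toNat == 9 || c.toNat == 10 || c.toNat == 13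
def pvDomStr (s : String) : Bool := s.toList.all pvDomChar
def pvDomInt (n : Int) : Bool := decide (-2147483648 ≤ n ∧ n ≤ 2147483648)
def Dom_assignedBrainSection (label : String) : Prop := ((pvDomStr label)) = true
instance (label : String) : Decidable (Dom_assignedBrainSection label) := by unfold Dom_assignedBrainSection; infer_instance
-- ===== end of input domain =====

-- B replaces A's scan over four hard-coded group lists by structural decoding of the label
-- (region prefix + digit, hemisphere from the digit's parity); objective: alternative.


-- ===== PORT A =====
-- loop 'for i in range(len(emotivLabels)): if label in emotivLabels[i]: return i' as structural recursion
def pvALoop (label : String) : List (List String) → Int → Int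
  | [], _ => -1
  | g :: gs, i => if label ∈ g then i else pvALoop label gs (i + 1)

def assignedBrainSection (label : String) : Int :=
  let pt_izq := ["P7", "T7", "O1"]
  let pt_der := ["P8", "T8", "O2"]
  let frontal_izq := ["F3", "F7", "AF3"]
  let frontal_der := ["F4", "F8", "AF4"]
  let emotivLabels := [pt_izq, pt_der, frontal_der, frontal_izq]
  pvALoop label emotivLabels 0

-- ===== PORT B =====
-- shared epilogue of Source B ('if not valid: return -1 … return 0/1/2/3 from frontal and parity')
def pvEmit (valid : Prop) [Decidable valid] (frontal : Bool) (n : Int) : Int :=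
  if ¬ valid then -1
  else if frontal then (if n % 2 = 1 then 3 else 2)
  else (if n % 2 = 1 then 0 else 1)

-- body after the head/tail split: 'n = ord(tail) - ord('0'); bounds check; region dispatch'
def pvDecode (head : String) (tail : Char) : Int :=
  let n : Int := (tail.toNat : Int) - 48   -- ord(tail) - ord('0'); exact for ASCII chars
  if ¬ (0 ≤ n ∧ n ≤ 9) then -1
  else if head = "P" ∨ head = "T" then pvEmit (n = 7 ∨ n = 8) false n
  else if head = "O" then pvEmit (n = 1 ∨ n = 2) false n
  else if head = "F" then pvEmit (n = 3 ∨ n = 4 ∨ n = 7 ∨ n = 8) true n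
  else if head = "AF" then pvEmit (n = 3 ∨ n = 4) true n
  else -1

-- 'if len(label)==3 and label[0]=="A": …  elif len(label)==2: …  else: return -1'
def assignedBrainSection_alt (label : String) : Int :=
  match label.toList with
  | [a, f, t] => if a = 'A' then pvDecode (String.ofList [a, f]) t else -1
  | [h, t] => pvDecode (String.ofList [h]) t
  | _ => -1

-- ===== PRECONDITION & SPEC =====
def Spec_assignedBrainSection (label : String) (out : Int) : Prop := out = assignedBrainSection_alt label
instance (label : String) (out : Int) : Decidable (Spec_assignedBrainSection label out) := by unfold Spec_assignedBrainSection; infer_instance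

-- ===== CLAIM (what is proved, stated in full; the proofs are below) =====
def Claim_equal_assignedBrainSection : Prop := ∀ (label : String), Dom_assignedBrainSection label → Spec_assignedBrainSection label (assignedBrainSection label)

-- ===== LEMMAS AND PROOFS =====

lemma pv_pin2 (label : String) (a x t : Char) (m : Nat) (lit : String)
    (hE : label.toList = [a, t]) (ha : a = x) (ht : t.toNat = m)
    (hLit : lit.toList = [x, Char.ofNat m]) : label = lit := by
  apply String.toList_inj.mp
  rw [hE, ha, hLit, ← ht, Char.ofNat_toNat]

lemma pv_pin3 (label : String) (f t : Char) (m : Nat) (lit : String)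
    (hE : label.toList = ['A', f, t]) (hf : f = 'F') (ht : t.toNat = m)
    (hLit : lit.toList = ['A', 'F', Char.ofNat m]) : label = lit := by
  apply String.toList_inj.mp
  rw [hE, hf, hLit, ← ht, Char.ofNat_toNat]

lemma pv_A_nonmem (label : String)
    (h1 : label ≠ "P7") (h2 : label ≠ "T7") (h3 : label ≠ "O1")
    (h4 : label ≠ "P8") (h5 : label ≠ "T8") (h6 : label ≠ "O2")
    (h7 : label ≠ "F4") (h8 : label ≠ "F8") (h9 : label ≠ "AF4")
    (h10 : label ≠ "F3") (h11 : label ≠ "F7") (h12 : label ≠ "AF3") :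
    assignedBrainSection label = -1 := by
  simp [assignedBrainSection, pvALoop, List.mem_cons,
        h1, h2, h3, h4, h5, h6, h7, h8, h9, h10, h11, h12]

lemma pv_decode2_nonmem (label : String) (a t : Char) (hE : label.toList = [a, t])
    (h1 : label ≠ "P7") (h2 : label ≠ "T7") (h3 : label ≠ "O1")
    (h4 : label ≠ "P8") (h5 : label ≠ "T8") (h6 : label ≠ "O2")
    (h7 : label ≠ "F4") (h8 : label ≠ "F8")
    (h10 : label ≠ "F3") (h11 : label ≠ "F7") :
    pvDecode (String.ofList [a]) t = -1 := by
  simp only [pvDecode, pvEmit]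
  split_ifs <;> try rfl
  all_goals exfalso
  all_goals try exact ‹False›
  all_goals rename_i hs hv hj hp
  · -- P/T region, odd digit: label would be "P7" or "T7"
    rcases hs with hs | hs
    · have ha := congrArg String.toList hs; simp at ha
      exact h1 (pv_pin2 label a 'P' t 55 "P7" hE ha (by omega) (by decide))
    · have ha := congrArg String.toList hs; simp at ha
      exact h2 (pv_pin2 label a 'T' t 55 "T7" hE ha (by omega) (by decide))
  · -- P/T region, even digit
    rcases hs with hs | hs
    · have ha := congrArg String.toList hs; simp at ha
      exact h4 (pv_pin2 label a 'P' t 56 "P8" hE ha (by omega) (by decide))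
    · have ha := congrArg String.toList hs; simp at ha
      exact h5 (pv_pin2 label a 'T' t 56 "T8" hE ha (by omega) (by decide))
  · -- O region, odd digit
    have ha := congrArg String.toList hs; simp at ha
    exact h3 (pv_pin2 label a 'O' t 49 "O1" hE ha (by omega) (by decide))
  · -- O region, even digit
    have ha := congrArg String.toList hs; simp at ha
    exact h6 (pv_pin2 label a 'O' t 50 "O2" hE ha (by omega) (by decide))
  · -- F region, odd digit (3 or 7)
    have ha := congrArg String.toList hv; simp at ha
    rcases hj with hn | hn | hn | hn
    · exact h10 (pv_pin2 label a 'F' t 51 "F3" hE ha (by omega) (by decide))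
    · omega
    · exact h11 (pv_pin2 label a 'F' t 55 "F7" hE ha (by omega) (by decide))
    · omega
  · -- F region, even digit (4 or 8)
    have ha := congrArg String.toList hv; simp at ha
    rcases hj with hn | hn | hn | hn
    · omega
    · exact h7 (pv_pin2 label a 'F' t 52 "F4" hE ha (by omega) (by decide))
    · omega
    · exact h8 (pv_pin2 label a 'F' t 56 "F8" hE ha (by omega) (by decide))
  · -- a one-character head cannot equal "AF"
    have ha := congrArg String.toList hv; simp at ha
  · have ha := congrArg String.toList hv; simp at ha

lemma pv_decode3_nonmem (label : String) (f t : Char) (hE : label.toList = ['A', f, t])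
    (h9 : label ≠ "AF4") (h12 : label ≠ "AF3") :
    pvDecode (String.ofList ['A', f]) t = -1 := by
  simp only [pvDecode, pvEmit]
  split_ifs <;> try rfl
  all_goals exfalso
  all_goals try exact ‹False›
  all_goals rename_i hs hv hj hp
  · rcases hs with hs | hs <;> · have := congrArg String.toList hs; simp at this
  · rcases hs with hs | hs <;> · have := congrArg String.toList hs; simp at this
  · have := congrArg String.toList hs; simp at this
  · have := congrArg String.toList hs; simp at this
  · have := congrArg String.toList hv; simp at this
  · have := congrArg String.toList hv; simp at this
  · -- AF region, odd digit: label would be "AF3"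
    have hf := congrArg String.toList hv; simp at hf
    rcases hj with hn | hn
    · exact h12 (pv_pin3 label f t 51 "AF3" hE hf (by omega) (by decide))
    · omega
  · -- AF region, even digit: label would be "AF4"
    have hf := congrArg String.toList hv; simp at hf
    rcases hj with hn | hn
    · omega
    · exact h9 (pv_pin3 label f t 52 "AF4" hE hf (by omega) (by decide))

lemma pv_alt_nonmem (label : String)
    (h1 : label ≠ "P7") (h2 : label ≠ "T7") (h3 : label ≠ "O1")
    (h4 : label ≠ "P8") (h5 : label ≠ "T8") (h6 : label ≠ "O2")
    (h7 : label ≠ "F4") (h8 : label ≠ "F8") (h9 : label ≠ "AF4")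
    (h10 : label ≠ "F3") (h11 : label ≠ "F7") (h12 : label ≠ "AF3") :
    assignedBrainSection_alt label = -1 := by
  unfold assignedBrainSection_alt
  cases hE : label.toList with
  | nil => rfl
  | cons a l1 =>
    cases hE1 : l1 with
    | nil => rfl
    | cons b l2 =>
      cases hE2 : l2 with
      | nil =>
        exact pv_decode2_nonmem label a b (by rw [hE, hE1, hE2])
          h1 h2 h3 h4 h5 h6 h7 h8 h10 h11
      | cons c l3 =>
        cases hE3 : l3 with
        | nil =>
          by_cases hA : a = 'A'
          · subst hA
            exact pv_decode3_nonmem label b c (by rw [hE, hE1, hE2, hE3]) h9 h12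
          · simp [hA]
        | cons d l4 => rfl

-- ===== VERDICT (by name: the statement is the Claim_ definition above) =====
theorem assignedBrainSection_spec : Claim_equal_assignedBrainSection := by
  intro label _
  unfold Spec_assignedBrainSection
  by_cases h1 : label = "P7"; · subst h1; decide
  by_cases h2 : label = "T7"; · subst h2; decide
  by_cases h3 : label = "O1"; · subst h3; decide
  by_cases h4 : label = "P8"; · subst h4; decide
  by_cases h5 : label = "T8"; · subst h5; decide
  by_cases h6 : label = "O2"; · subst h6; decide
  by_cases h7 : label = "F4"; · subst h7; decide
  by_cases h8 : label = "F8"; · subst h8; decide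
  by_cases h9 : label = "AF4"; · subst h9; decide
  by_cases h10 : label = "F3"; · subst h10; decide
  by_cases h11 : label = "F7"; · subst h11; decide
  by_cases h12 : label = "AF3"; · subst h12; decide
  rw [pv_A_nonmem label h1 h2 h3 h4 h5 h6 h7 h8 h9 h10 h11 h12,
      pv_alt_nonmem label h1 h2 h3 h4 h5 h6 h7 h8 h9 h10 h11 h12]
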